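-- pv_equiv track=rewrite | github.com/dudcheol/AlgoSSAFY | 28-1주차/신규 아이디 추천/이석재/sol.py | solution
-- ===== SOURCE A (Python) =====
-- def solution(new_id):
--     result = new_id.lower()
--     set1 = {chr(i) for i in range(97, 123)}
--     set1 = set1 | {str(i) for i in range(0, 10)}
--     set1 = set1 | {"-", "_", "."}
--     result_list = list(result)
--     result_list = list(filter(lambda x: x in set1, result_list))
--     stack = []
--     for item in result_list:
--         if not stack:
--             if item == ".":
--                 continue
--             stack.append(item)
--         else:
--             if item == "." and stack[-1] == ".":
--                 continue
--             stack.append(item)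
--     if stack and stack[-1] == ".":
--         stack.pop()
--     if not stack:
--         stack.append("a")
--     if len(stack) >= 16:
--         stack = stack[:15]
--         if stack[-1] == ".":
--             stack.pop()
--     if len(stack) <= 2:
--         while len(stack) != 3:
--             stack.append(stack[-1])
--     return "".join(stack)
-- ===== SOURCE B (Python) =====
-- def solution(new_id):
--     allowed = "abcdefghijklmnopqrstuvwxyz0123456789-_."
--     s = "".join(c for c in new_id.lower() if c in allowed)
--     s = ".".join(p for p in s.split(".") if p)
--     if not s:
--         s = "a"
--     s = s[:15].rstrip(".")
--     return s + s[-1] * (3 - len(s))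
-- ===== Notes on version B (the rewrite author's own statement) =====
-- stated objective: idiomatic
-- what changed: A's hand-built allowed-character set, dot-collapsing stack loop with explicit leading/trailing-dot handling and append-while padding loop are replaced by an idiomatic pipeline: filter against a literal allowed string, split on the dot character and re-join the nonempty pieces (which collapses dot runs and strips boundary dots in one step), rstrip after truncation, and arithmetic padding with the last character repeated 3-len(s) times.
import Mathlib
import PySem

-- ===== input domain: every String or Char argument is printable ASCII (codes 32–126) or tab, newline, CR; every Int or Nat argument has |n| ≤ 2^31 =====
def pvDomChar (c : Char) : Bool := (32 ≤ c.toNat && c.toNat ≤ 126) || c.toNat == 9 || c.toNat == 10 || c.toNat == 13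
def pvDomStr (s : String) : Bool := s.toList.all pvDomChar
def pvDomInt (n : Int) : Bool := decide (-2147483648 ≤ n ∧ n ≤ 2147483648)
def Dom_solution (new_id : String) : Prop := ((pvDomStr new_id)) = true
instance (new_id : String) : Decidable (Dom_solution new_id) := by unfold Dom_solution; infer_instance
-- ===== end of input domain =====

-- B replaces A's explicit filter-set construction and dot-collapsing stack loop by an
-- idiomatic split/join pipeline (split on the dot, drop empty pieces, re-join) plus rstrip and pad.

-- ===== PORT A =====
-- the while-loop 'while len(stack) != 3: stack.append(stack[-1])' is entered only with
-- 1 ≤ len(stack) ≤ 2, so it runs at most 3 iterations; fuel 3 is exact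
def padWhile : Nat → List Char → List Char
  | 0, s => s
  | n + 1, s => if s.length ≠ 3 then padWhile n (s ++ [s.getLast!]) else s

def solution (new_id : String) : String :=
  let result := PySem.Str.lower new_id
  -- chr(i) for 97 ≤ i < 123 is Char.ofNat i; str(i) for 0 ≤ i < 10 is the digit chr(48+i) — exact on these ranges
  let set1 : PySem.Set Char := PySem.Set.ofList
      ((PySem.List.pyRange 97 123 1).map (fun i => Char.ofNat i.toNat))
  let set1 := PySem.Set.union set1
      (PySem.Set.ofList ((PySem.List.pyRange 0 10 1).map (fun i => Char.ofNat (48 + i.toNat))))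
  let set1 := PySem.Set.union set1 (PySem.Set.ofList ['-', '_', '.'])
  let result_list := result.toList
  let result_list := result_list.filter (fun x => PySem.Set.contains set1 x)
  let stack : List Char := result_list.foldl (fun stack item =>
    if stack = [] then
      if item = '.' then stack
      else stack ++ [item]
    else
      if item = '.' ∧ stack.getLast! = '.' then stack
      else stack ++ [item]) []
  let stack := if stack ≠ [] ∧ stack.getLast! = '.' then stack.dropLast else stack
  let stack := if stack = [] then ['a'] else stack
  let stack := if 16 ≤ stack.length then
      let s := PySem.List.slice stack none (some 15)
      if s.getLast! = '.' then s.dropLast else s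
    else stack
  let stack := if stack.length ≤ 2 then padWhile 3 stack else stack
  String.ofList stack

-- ===== PORT B =====
def solution_alt (new_id : String) : String :=
  let allowed := "abcdefghijklmnopqrstuvwxyz0123456789-_."
  -- Python's 'c in allowed' on the 1-char c is character membership — exact
  let s := (PySem.Str.lower new_id).toList.filter (fun c => allowed.toList.contains c)
  -- s.split(".") on a list of chars is List.splitOn '.'; ".".join is List.intercalate ['.']
  let s := List.intercalate ['.'] ((s.splitOn '.').filter (fun p => p ≠ []))
  let s := if s = [] then ['a'] else s
  let s := PySem.List.slice s none (some 15)
  -- s.rstrip('.') drops the maximal suffix of '.' characters — exact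
  let s := (s.reverse.dropWhile (fun c => c = '.')).reverse
  -- s + s[-1] * (3 - len(s)): a non-positive Python repeat count gives "", i.e. Nat subtraction
  String.ofList (s ++ List.replicate (3 - s.length) s.getLast!)

-- ===== PRECONDITION & SPEC =====
def Spec_solution (new_id : String) (out : String) : Prop := out = solution_alt new_id
instance (new_id : String) (out : String) : Decidable (Spec_solution new_id out) := by unfold Spec_solution; infer_instance

-- ===== CLAIM (what is proved, stated in full; the proofs are below) =====
def Claim_equal_solution : Prop := ∀ (new_id : String), Dom_solution new_id → Spec_solution new_id (solution new_id)

-- ===== LEMMAS AND PROOFS =====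

-- A's loop body
def pvStep (stack : List Char) (item : Char) : List Char :=
  if stack = [] then
    if item = '.' then stack
    else stack ++ [item]
  else
    if item = '.' ∧ stack.getLast! = '.' then stack
    else stack ++ [item]

-- what A's loop appends once the stack is nonempty with last kept char b
def pvG (b : Char) : List Char → List Char
  | [] => []
  | d :: t => if d = '.' ∧ b = '.' then pvG b t else d :: pvG d t

-- A's whole stack loop from the empty stack
def pvH : List Char → List Char
  | [] => []
  | c :: t => if c = '.' then pvH t else c :: pvG c t

-- A's "pop one trailing dot"
def pvStrip (s : List Char) : List Char :=
  if s ≠ [] ∧ s.getLast! = '.' then s.dropLast else s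

-- B's split/join core
def pvJ (l : List Char) : List Char :=
  List.intercalate ['.'] ((l.splitOn '.').filter (fun p => p ≠ []))

-- no two adjacent dots
def pvR (a b : Char) : Prop := ¬(a = '.' ∧ b = '.')

theorem pvGetLast!_concat (l : List Char) (b : Char) : (l ++ [b]).getLast! = b := by
  simp [List.getLast!_eq_getLast?_getD]

theorem pvStrip_concat (y : List Char) (c : Char) :
    pvStrip (y ++ [c]) = if c = '.' then y else y ++ [c] := by
  simp [pvStrip, List.getLast!_eq_getLast?_getD]

theorem pvStrip_cons (a : Char) (x : List Char) (hx : x ≠ []) :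
    pvStrip (a :: x) = a :: pvStrip x := by
  rcases List.eq_nil_or_concat' x with h | ⟨y, c, rfl⟩
  · exact absurd h hx
  · rw [show a :: (y ++ [c]) = (a :: y) ++ [c] by simp, pvStrip_concat, pvStrip_concat]
    split <;> simp

theorem pvFoldl_ne_nil (l : List Char) : ∀ acc : List Char, acc ≠ [] →
    l.foldl pvStep acc = acc ++ pvG acc.getLast! l := by
  induction l with
  | nil => intro acc _; simp [pvG]
  | cons d t ih =>
    intro acc hacc
    have hstep : pvStep acc d = if d = '.' ∧ acc.getLast! = '.' then acc else acc ++ [d] := by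
      rw [pvStep, if_neg hacc]
    by_cases hd : d = '.' ∧ acc.getLast! = '.'
    · rw [List.foldl_cons, hstep, if_pos hd, ih acc hacc]
      have : pvG acc.getLast! (d :: t) = pvG acc.getLast! t := by
        rw [pvG, if_pos hd]
      rw [this]
    · rw [List.foldl_cons, hstep, if_neg hd, ih (acc ++ [d]) (by simp), pvGetLast!_concat]
      have : pvG acc.getLast! (d :: t) = d :: pvG d t := by
        rw [pvG, if_neg hd]
      rw [this, List.append_assoc, List.singleton_append]

theorem pvFoldl_eq_pvH (l : List Char) : l.foldl pvStep [] = pvH l := by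
  induction l with
  | nil => rfl
  | cons c t ih =>
    by_cases hc : c = '.'
    · rw [List.foldl_cons, show pvStep [] c = [] by simp [pvStep, hc], ih, pvH, if_pos hc]
    · rw [List.foldl_cons, show pvStep [] c = [c] by simp [pvStep, hc],
        pvFoldl_ne_nil t [c] (by simp), pvH, if_neg hc]
      rfl

theorem pvG_dot (t : List Char) : pvG '.' t = pvH t := by
  induction t with
  | nil => rfl
  | cons d t ih =>
    by_cases hd : d = '.'
    · rw [pvG, if_pos ⟨hd, rfl⟩, ih, pvH, if_pos hd]
    · rw [pvG, if_neg (by simp [hd]), pvH, if_neg hd]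

-- pvH is empty or starts with a non-dot
theorem pvH_head (l : List Char) : pvH l = [] ∨ ∃ e u, pvH l = e :: u ∧ e ≠ '.' := by
  induction l with
  | nil => exact Or.inl rfl
  | cons c t ih =>
    by_cases hc : c = '.'
    · rw [pvH, if_pos hc]; exact ih
    · exact Or.inr ⟨c, pvG c t, by rw [pvH, if_neg hc], hc⟩

theorem pvChain_G (t : List Char) : ∀ b, List.IsChain pvR (b :: pvG b t) := by
  induction t with
  | nil => intro b; simp [pvG]
  | cons d t ih =>
    intro b
    by_cases hd : d = '.' ∧ b = '.'
    · rw [pvG, if_pos hd]; exact ih b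
    · rw [pvG, if_neg hd, List.isChain_cons]
      refine ⟨?_, ih d⟩
      intro y hy
      simp only [List.head?_cons, Option.mem_def, Option.some.injEq] at hy
      subst hy
      exact fun hcon => hd ⟨hcon.2, hcon.1⟩

theorem pvChain_H (l : List Char) : List.IsChain pvR (pvH l) := by
  induction l with
  | nil => simp [pvH]
  | cons c t ih =>
    by_cases hc : c = '.'
    · rw [pvH, if_pos hc]; exact ih
    · rw [pvH, if_neg hc]; exact pvChain_G t c

theorem pvChain_strip (x : List Char) (h : List.IsChain pvR x) :
    List.IsChain pvR (pvStrip x) := by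
  rcases List.eq_nil_or_concat' x with rfl | ⟨y, c, rfl⟩
  · simp [pvStrip]
  · rw [pvStrip_concat]
    split
    · exact (List.isChain_append.mp h).1
    · exact h

-- chain on y ++ ['.'] forces y's last char to be a non-dot
theorem pvChain_last (y : List Char) (h : List.IsChain pvR (y ++ ['.'])) :
    y = [] ∨ ∃ z d, y = z ++ [d] ∧ d ≠ '.' := by
  rcases List.eq_nil_or_concat' y with rfl | ⟨z, d, rfl⟩
  · exact Or.inl rfl
  · refine Or.inr ⟨z, d, rfl, ?_⟩
    have h3 := (List.isChain_append.mp h).2.2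
    have := h3 d (by simp) '.' (by simp)
    intro hd; exact this ⟨hd, rfl⟩

-- rstrip('.') on a no-adjacent-dots list is "pop one trailing dot"
theorem pvRstrip_eq (x : List Char) (h : List.IsChain pvR x) :
    (x.reverse.dropWhile (fun c => c = '.')).reverse = pvStrip x := by
  rcases List.eq_nil_or_concat' x with rfl | ⟨y, c, rfl⟩
  · simp [pvStrip]
  · rw [pvStrip_concat, List.reverse_append, List.reverse_singleton, List.singleton_append,
      List.dropWhile_cons]
    by_cases hc : c = '.'
    · rw [if_pos (by simp [hc]), if_pos hc]
      rcases pvChain_last y (hc ▸ h) with rfl | ⟨z, d, rfl, hd⟩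
      · simp
      · rw [List.reverse_append, List.reverse_singleton, List.singleton_append,
          List.dropWhile_cons, if_neg (by simp [hd])]
        simp
    · rw [if_neg (by simp [hc]), if_neg hc]
      simp

theorem pvStrip_strip (x : List Char) (h : List.IsChain pvR x) :
    pvStrip (pvStrip x) = pvStrip x := by
  rcases List.eq_nil_or_concat' x with rfl | ⟨y, c, rfl⟩
  · simp [pvStrip]
  · rw [pvStrip_concat]
    by_cases hc : c = '.'
    · rw [if_pos hc]
      rcases pvChain_last y (hc ▸ h) with rfl | ⟨z, d, rfl, hd⟩
      · simp [pvStrip]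
      · rw [pvStrip_concat, if_neg hd]
    · rw [if_neg hc, pvStrip_concat, if_neg hc]

-- split/join recurrences
theorem pvIntercalate_cons₂ (s x y : List Char) (r : List (List Char)) :
    List.intercalate s (x :: y :: r) = x ++ s ++ List.intercalate s (y :: r) := by
  simp [List.intercalate, List.intersperse]

theorem pvIntercalate_cons_head (c : Char) (p : List Char) (qs : List (List Char)) :
    List.intercalate ['.'] ((c :: p) :: qs) = c :: List.intercalate ['.'] (p :: qs) := by
  cases qs with
  | nil => simp [List.intercalate]
  | cons y ys => rw [pvIntercalate_cons₂, pvIntercalate_cons₂]; simp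

theorem pvIntercalate_ne_nil (q : List Char) (qs : List (List Char)) (hq : q ≠ []) :
    List.intercalate ['.'] (q :: qs) ≠ [] := by
  cases qs with
  | nil => simpa [List.intercalate]
  | cons y ys => rw [pvIntercalate_cons₂]; simp

theorem pvJ_nil : pvJ [] = [] := by
  simp [pvJ, List.splitOn, List.splitOnP_nil, List.intercalate]

theorem pvJ_dot (t : List Char) : pvJ ('.' :: t) = pvJ t := by
  simp [pvJ, List.splitOn, List.splitOnP_cons]

theorem pvJ_singleton (c : Char) (hc : c ≠ '.') : pvJ [c] = [c] := by
  simp [pvJ, List.splitOn, List.splitOnP_cons, List.splitOnP_nil, hc, List.intercalate]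

theorem pvJ_cons_cons (c d : Char) (hc : c ≠ '.') (hd : d ≠ '.') (t : List Char) :
    pvJ (c :: d :: t) = c :: pvJ (d :: t) := by
  obtain ⟨p, ps, hps⟩ : ∃ p ps, List.splitOnP (fun x => x == '.') t = p :: ps := by
    cases h : List.splitOnP (fun x => x == '.') t with
    | nil => exact absurd h (List.splitOnP_ne_nil _ t)
    | cons p ps => exact ⟨p, ps, rfl⟩
  simp only [pvJ, List.splitOn, List.splitOnP_cons, beq_iff_eq, if_neg hc, if_neg hd, hps,
    List.modifyHead_cons, List.filter_cons, decide_true, ne_eq, List.cons_ne_nil,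
    not_false_eq_true, if_true]
  rw [pvIntercalate_cons_head]

theorem pvJ_cons_dot (c : Char) (hc : c ≠ '.') (t : List Char) :
    pvJ (c :: '.' :: t) = if pvJ t = [] then [c] else c :: '.' :: pvJ t := by
  simp only [pvJ, List.splitOn, List.splitOnP_cons, beq_iff_eq, if_neg hc,
    List.modifyHead_cons, List.filter_cons, decide_true, ne_eq, List.cons_ne_nil,
    not_false_eq_true, if_true]
  cases hft : (List.splitOnP (fun x => x == '.') t).filter (fun p => p ≠ []) with
  | nil => simp [List.intercalate]
  | cons q qs =>
    have hq : q ≠ [] := by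
      have : q ∈ (List.splitOnP (fun x => x == '.') t).filter (fun p => p ≠ []) := by
        rw [hft]; exact List.mem_cons_self
      simpa using (List.mem_filter.mp this).2
    rw [pvIntercalate_cons₂, if_neg (pvIntercalate_ne_nil q qs hq)]
    simp

-- the inner step of the heart: a nonempty stack headed by a non-dot
theorem pvQ (n : Nat) (hS : ∀ l : List Char, l.length ≤ n → pvStrip (pvH l) = pvJ l) :
    ∀ t : List Char, t.length ≤ n → ∀ c, c ≠ '.' → pvStrip (c :: pvG c t) = pvJ (c :: t) := by
  intro t
  induction t with
  | nil =>
    intro _ c hc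
    rw [show pvG c [] = [] from rfl, pvJ_singleton c hc]
    simp [pvStrip, List.getLast!_eq_getLast?_getD, hc]
  | cons d t' ih =>
    intro hlen c hc
    have hlen' : t'.length ≤ n := by simp at hlen; omega
    by_cases hd : d = '.'
    · subst hd
      have hG : pvG c ('.' :: t') = '.' :: pvH t' := by
        rw [pvG, if_neg (by simp [hc]), pvG_dot]
      rw [hG, pvJ_cons_dot c hc]
      rcases pvH_head t' with h0 | ⟨e, u, heu, he⟩
      · have hJ0 : pvJ t' = [] := by rw [← hS t' hlen', h0]; rfl
        rw [h0, if_pos hJ0, show c :: ['.'] = [c] ++ ['.'] by simp, pvStrip_concat, if_pos rfl]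
      · have hne : pvStrip (pvH t') ≠ [] := by
          rw [heu]
          rcases List.eq_nil_or_concat' u with rfl | ⟨z, d', rfl⟩
          · simp [pvStrip, List.getLast!_eq_getLast?_getD, he]
          · rw [pvStrip_cons e _ (by simp)]; simp
        have hJne : pvJ t' ≠ [] := by rw [← hS t' hlen']; exact hne
        rw [if_neg hJne, heu, pvStrip_cons c _ (by simp), pvStrip_cons '.' _ (by simp),
          ← heu, hS t' hlen']
    · have hG : pvG c (d :: t') = d :: pvG d t' := by rw [pvG, if_neg (by simp [hd])]
      rw [hG, pvStrip_cons c _ (by simp), ih hlen' d hd, pvJ_cons_cons c d hc hd]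

-- the heart: A's collapsed-and-popped stack is B's split/join
theorem pvCore (l : List Char) : pvStrip (pvH l) = pvJ l := by
  suffices H : ∀ n (l : List Char), l.length ≤ n → pvStrip (pvH l) = pvJ l from
    H l.length l le_rfl
  intro n
  induction n with
  | zero =>
    intro l hl
    rw [List.eq_nil_of_length_eq_zero (Nat.le_zero.mp hl)]
    rw [show pvH [] = [] from rfl, pvJ_nil]; rfl
  | succ n ihn =>
    intro l hl
    cases l with
    | nil => rw [show pvH [] = [] from rfl, pvJ_nil]; rfl
    | cons c t =>
      have hlen : t.length ≤ n := by simp at hl; omega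
      by_cases hc : c = '.'
      · rw [pvH, if_pos hc, hc, pvJ_dot]
        exact ihn t hlen
      · rw [pvH, if_neg hc]
        exact pvQ n ihn t hlen c hc

-- the padding loop pads with the last char up to length 3
theorem pvPad (s : List Char) (h1 : s ≠ []) (h2 : s.length ≤ 2) :
    padWhile 3 s = s ++ List.replicate (3 - s.length) s.getLast! := by
  match s, h1, h2 with
  | [a], _, _ =>
    simp [padWhile, List.getLast!_eq_getLast?_getD]
  | [a, b], _, _ =>
    simp [padWhile, List.getLast!_eq_getLast?_getD]

-- assembling the tails of the two programs, over the common filtered char list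
theorem pvStripA_eq (s : List Char) :
    (if s.getLast! = '.' then s.dropLast else s) = pvStrip s := by
  rcases List.eq_nil_or_concat' s with rfl | ⟨y, c, rfl⟩
  · rw [pvStrip, if_neg (by simp)]
    rw [if_neg (by rw [List.getLast!_nil]; decide)]
  · rw [pvGetLast!_concat, pvStrip_concat]
    split <;> simp

theorem pvAssemble (F : List Char) :
    (let st2 := pvStrip (F.foldl pvStep []);
     let st3 := if st2 = [] then ['a'] else st2;
     let st4 := if 16 ≤ st3.length then
         (let s := PySem.List.slice st3 none (some 15);
          if s.getLast! = '.' then s.dropLast else s)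
       else st3;
     if st4.length ≤ 2 then padWhile 3 st4 else st4)
    = (let s := if pvJ F = [] then ['a'] else pvJ F;
       let s := PySem.List.slice s none (some 15);
       let s := (s.reverse.dropWhile (fun c => c = '.')).reverse;
       s ++ List.replicate (3 - s.length) s.getLast!) := by
  have hslice : ∀ x : List Char, PySem.List.slice x none (some 15) = x.take 15 := fun x =>
    PySem.List.slice_to x (by norm_num)
  rw [pvFoldl_eq_pvH, pvCore]
  set C := if pvJ F = [] then ['a'] else pvJ F with hC
  have hCchain : List.IsChain pvR C := by
    rw [hC]; split
    · simp
    · rw [← pvCore]; exact pvChain_strip _ (pvChain_H F)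
  have hChead : ∃ e u, C = e :: u ∧ e ≠ '.' := by
    rw [hC]; split
    · exact ⟨'a', [], rfl, by decide⟩
    · rename_i hne
      rw [← pvCore] at hne ⊢
      rcases pvH_head F with h0 | ⟨e, u, heu, he⟩
      · rw [h0] at hne; exact absurd rfl hne
      · rw [heu]
        rcases List.eq_nil_or_concat' u with rfl | ⟨z, d, rfl⟩
        · exact ⟨e, [], by rw [pvStrip, if_neg (by simp [List.getLast!_eq_getLast?_getD, he])], he⟩
        · rw [pvStrip_cons e _ (by simp)]; exact ⟨e, _, rfl, he⟩
  have hStripC : pvStrip C = C := by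
    rw [hC]; split
    · rw [pvStrip, if_neg (by simp [List.getLast!_eq_getLast?_getD])]
    · rw [← pvCore]; exact pvStrip_strip _ (pvChain_H F)
  simp only [hslice, ← hC]
  have hst4 : (if 16 ≤ C.length then
      (if (C.take 15).getLast! = '.' then (C.take 15).dropLast else C.take 15)
      else C) = pvStrip (C.take 15) := by
    split
    · exact pvStripA_eq _
    · rename_i hlen
      rw [List.take_of_length_le (by omega), hStripC]
  rw [hst4, pvRstrip_eq _ (hCchain.take 15)]
  obtain ⟨e, u, hCe, he⟩ := hChead
  have hSne : pvStrip (C.take 15) ≠ [] := by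
    rw [hCe, List.take_succ_cons]
    rcases List.eq_nil_or_concat' (u.take 14) with hnil | ⟨z, d, hzd⟩
    · rw [hnil, pvStrip, if_neg (by simp [List.getLast!_eq_getLast?_getD, he])]
      simp
    · rw [hzd, pvStrip_cons e _ (by simp)]; simp
  split
  · rename_i hle
    exact pvPad _ hSne hle
  · rename_i hgt
    rw [show 3 - (pvStrip (C.take 15)).length = 0 by omega, List.replicate_zero,
      List.append_nil]

-- ===== VERDICT (by name: the statement is the Claim_ definition above) =====
set_option maxRecDepth 8192 in
theorem solution_spec : Claim_equal_solution := by
  intro new_id _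
  show solution new_id = solution_alt new_id
  have hset : (PySem.Set.union (PySem.Set.union (PySem.Set.ofList
      ((PySem.List.pyRange 97 123 1).map (fun i => Char.ofNat i.toNat)))
      (PySem.Set.ofList ((PySem.List.pyRange 0 10 1).map (fun i => Char.ofNat (48 + i.toNat)))))
      (PySem.Set.ofList ['-', '_', '.']))
      = "abcdefghijklmnopqrstuvwxyz0123456789-_.".toList := by decide
  unfold solution solution_alt
  simp only [hset, PySem.Set.contains_eq_listContains]
  exact congrArg String.ofList (pvAssemble _)
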